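-- pv_equiv track=rewrite | github.com/ppc86193-lgtm/cloud-function-source | pc28-main-function/pc28-main-function-cloud/scaffold.py | cpu_intensive_task
-- ===== SOURCE A (Python) =====
-- from typing import List, Dict, Any
--
-- def cpu_intensive_task(data: List[int]) -> List[int]:
--     """CPU密集型任务（可并行化优化）"""
--     results = []
--     for item in data:
--         # 模拟复杂计算
--         result = 0
--         for i in range(1000):
--             result += item * i * i
--         results.append(result)
--     return results
-- ===== SOURCE B (Python) =====
-- def cpu_intensive_task(data):
--     """Multiply each item by the closed-form constant sum(i*i for i in range(1000))."""
--     C = 999 * 1000 * 1999 // 6  # = 332833500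
--     return [item * C for item in data]
-- ===== Notes on version B (the rewrite author's own statement) =====
-- stated objective: faster
-- what changed: Replaces the 1000-iteration inner summation per element with a single multiplication by the closed-form constant sum(i*i,i<1000)=332833500.
import Mathlib
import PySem

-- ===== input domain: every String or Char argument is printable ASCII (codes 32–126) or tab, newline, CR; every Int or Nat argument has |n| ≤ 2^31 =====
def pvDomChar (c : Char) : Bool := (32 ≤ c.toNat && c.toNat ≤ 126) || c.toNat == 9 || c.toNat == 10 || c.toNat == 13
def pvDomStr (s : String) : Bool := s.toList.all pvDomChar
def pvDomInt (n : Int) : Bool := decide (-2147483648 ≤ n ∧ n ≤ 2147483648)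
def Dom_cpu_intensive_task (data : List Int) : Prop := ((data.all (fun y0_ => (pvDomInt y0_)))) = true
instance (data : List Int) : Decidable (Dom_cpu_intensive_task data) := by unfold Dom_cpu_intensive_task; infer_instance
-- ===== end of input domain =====

-- B replaces A's per-element 1000-step summation by one multiplication with the closed-form constant.

-- ===== PORT A =====
def cpu_intensive_task (data : List Int) : List Int :=
  data.foldl (fun results item =>
    results ++ [(PySem.List.pyRange 0 1000 1).foldl (fun result i => result + item * i * i) 0]) []

-- ===== PORT B =====
def cpu_intensive_task_alt (data : List Int) : List Int :=
  data.map (fun item => item * (999 * 1000 * 1999 / 6))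

-- ===== PRECONDITION & SPEC =====
def Spec_cpu_intensive_task (data : List Int) (out : List Int) : Prop := out = cpu_intensive_task_alt data
instance (data : List Int) (out : List Int) : Decidable (Spec_cpu_intensive_task data out) := by unfold Spec_cpu_intensive_task; infer_instance

-- ===== CLAIM (what is proved, stated in full; the proofs are below) =====
def Claim_equal_cpu_intensive_task : Prop := ∀ (data : List Int), Dom_cpu_intensive_task data → Spec_cpu_intensive_task data (cpu_intensive_task data)

-- ===== LEMMAS AND PROOFS =====
theorem sq_foldl_acc (l : List Int) (acc : Int) :
    l.foldl (fun s i => s + i * i) acc = acc + l.foldl (fun s i => s + i * i) 0 := by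
  induction l generalizing acc with
  | nil => simp
  | cons x xs ih =>
      simp only [List.foldl_cons]
      rw [ih (acc + x * x), ih (0 + x * x)]
      ring

theorem inner_foldl_factor (item : Int) (l : List Int) (acc : Int) :
    l.foldl (fun result i => result + item * i * i) acc
      = acc + item * l.foldl (fun s i => s + i * i) 0 := by
  induction l generalizing acc with
  | nil => simp
  | cons x xs ih =>
      simp only [List.foldl_cons]
      rw [ih (acc + item * x * x), sq_foldl_acc xs (0 + x * x)]
      ring

set_option maxRecDepth 100000 in
theorem sumsq_const :
    (PySem.List.pyRange 0 1000 1).foldl (fun s i => s + i * i) 0 = 332833500 := by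
  decide

theorem cpu_foldl_map (data : List Int) (acc : List Int) :
    data.foldl (fun results item =>
      results ++ [(PySem.List.pyRange 0 1000 1).foldl (fun result i => result + item * i * i) 0]) acc
      = acc ++ data.map (fun item => item * 332833500) := by
  induction data generalizing acc with
  | nil => simp
  | cons x xs ih =>
      simp only [List.foldl_cons, List.map_cons]
      rw [ih, inner_foldl_factor, sumsq_const]
      simp

-- ===== VERDICT (by name: the statement is the Claim_ definition above) =====
theorem cpu_intensive_task_spec : Claim_equal_cpu_intensive_task := by
  intro data _
  unfold Spec_cpu_intensive_task cpu_intensive_task cpu_intensive_task_alt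
  rw [cpu_foldl_map]
  norm_num
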